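-- pv_equiv track=rewrite | github.com/kenchang198/Python-Algorithm-Practice | 2025-04-23-2/code/mystery_function_analysis.py | mystery_function_1
-- ===== SOURCE A (Python) =====
-- def mystery_function_1(n):
--     """
--     Mystery関数1の計算量分析
--     - 外側のループは n 回実行
--     - 内側のループは、iの値に応じて (n-i) 回実行
--     - 合計の実行回数: n + (n-1) + (n-2) + ... + 1 = n(n+1)/2
--     - 計算量: O(n²)
--     """
--     result = 0
--     operations = 0
--
--     for i in range(n):
--         for j in range(i, n):
--             # 実際の操作（ここでは単純な加算）
--             result += i * j
--             operations += 1
--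
--     return result, operations
-- ===== SOURCE B (Python) =====
-- def mystery_function_1(n):
--     # Closed-form: result = sum_{0<=i<=j<n} i*j = (S^2 + Q)/2 with
--     # S = sum_{k<n} k, Q = sum_{k<n} k^2; operations = n(n+1)/2.
--     if n <= 0:
--         return 0, 0
--     m = n - 1
--     s = m * (m + 1) // 2
--     q = m * (m + 1) * (2 * m + 1) // 6
--     return (s * s + q) // 2, n * (n + 1) // 2
-- ===== Notes on version B (the rewrite author's own statement) =====
-- stated objective: faster
-- what changed: Replaced the O(n^2) double loop with closed-form triangular/square-pyramidal summation formulas evaluated in O(1).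
import Mathlib
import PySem

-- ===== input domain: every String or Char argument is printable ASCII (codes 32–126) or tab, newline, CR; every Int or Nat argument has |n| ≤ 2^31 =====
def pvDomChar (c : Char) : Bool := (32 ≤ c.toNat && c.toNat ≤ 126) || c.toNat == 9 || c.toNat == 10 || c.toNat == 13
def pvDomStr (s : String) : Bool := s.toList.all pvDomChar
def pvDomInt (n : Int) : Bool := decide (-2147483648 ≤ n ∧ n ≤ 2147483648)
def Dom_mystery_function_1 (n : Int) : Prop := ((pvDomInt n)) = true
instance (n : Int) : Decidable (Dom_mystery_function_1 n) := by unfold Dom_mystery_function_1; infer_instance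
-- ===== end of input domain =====

-- B replaces A's O(n^2) double loop by closed-form summation formulas, evaluated in O(1).

-- ===== PORT A =====
def mystery_function_1 (n : Int) : List Int :=
  let st :=
    (PySem.List.pyRange 0 n 1).foldl
      (fun (st : Int × Int) i =>
        (PySem.List.pyRange i n 1).foldl
          (fun (st2 : Int × Int) j => (st2.1 + i * j, st2.2 + 1)) st)
      (0, 0)
  [st.1, st.2]

-- ===== PORT B =====
def mystery_function_1_alt (n : Int) : List Int :=
  if n ≤ 0 then [0, 0]
  else
    let m := n - 1
    let s := PySem.Int.floordiv (m * (m + 1)) 2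
    let q := PySem.Int.floordiv (m * (m + 1) * (2 * m + 1)) 6
    [PySem.Int.floordiv (s * s + q) 2, PySem.Int.floordiv (n * (n + 1)) 2]

-- ===== PRECONDITION & SPEC =====
def Spec_mystery_function_1 (n : Int) (out : List Int) : Prop := out = mystery_function_1_alt n
instance (n : Int) (out : List Int) : Decidable (Spec_mystery_function_1 n out) := by unfold Spec_mystery_function_1; infer_instance

-- ===== CLAIM (what is proved, stated in full; the proofs are below) =====
def Claim_equal_mystery_function_1 : Prop := ∀ (n : Int), Dom_mystery_function_1 n → Spec_mystery_function_1 n (mystery_function_1 n)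

-- ===== LEMMAS AND PROOFS =====

-- the sums computed by A's double loop
def pvRsum (n : Int) : Int :=
  ((PySem.List.pyRange 0 n 1).map (fun i => i * (PySem.List.pyRange i n 1).sum)).sum
def pvOsum (n : Int) : Int :=
  ((PySem.List.pyRange 0 n 1).map (fun i => ((PySem.List.pyRange i n 1).length : Int))).sum
def pvGsum (n : Int) : Int := (PySem.List.pyRange 0 n 1).sum

theorem pv_sum_map_add (l : List Int) (f g : Int → Int) :
    (l.map (fun x => f x + g x)).sum = (l.map f).sum + (l.map g).sum := by
  induction l with
  | nil => simp
  | cons a t ih => simp [ih]; ring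

theorem pv_sum_map_mul_right (l : List Int) (c : Int) :
    (l.map (fun x => x * c)).sum = l.sum * c := by
  induction l with
  | nil => simp
  | cons a t ih => simp [ih]; ring

theorem pv_sum_map_one (l : List Int) :
    (l.map (fun _ => (1 : Int))).sum = l.length := by
  induction l with
  | nil => simp
  | cons a t ih => simp; omega

-- the inner loop adds i * (sum of the js) to result and the number of js to operations
theorem pv_inner_fold (i : Int) (l : List Int) (st : Int × Int) :
    l.foldl (fun (st2 : Int × Int) j => (st2.1 + i * j, st2.2 + 1)) st
      = (st.1 + i * l.sum, st.2 + l.length) := by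
  induction l generalizing st with
  | nil => simp
  | cons a t ih =>
      simp only [List.foldl_cons, ih, List.sum_cons, List.length_cons]
      refine Prod.ext ?_ ?_
      · simp; ring
      · simp; omega

-- a fold whose step adds componentwise is a pair of sums
theorem pv_pair_fold (F : Int × Int → Int → Int × Int) (f g : Int → Int)
    (hF : ∀ st x, F st x = (st.1 + f x, st.2 + g x)) (l : List Int) (st : Int × Int) :
    l.foldl F st = (st.1 + (l.map f).sum, st.2 + (l.map g).sum) := by
  induction l generalizing st with
  | nil => simp
  | cons a t ih =>
      rw [List.foldl_cons, hF, ih]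
      refine Prod.ext ?_ ?_
      · simp; ring
      · simp; ring

-- the outer loop is a pair of sums
theorem pv_outer_fold (n : Int) (l : List Int) (st : Int × Int) :
    l.foldl (fun (st : Int × Int) i =>
        (PySem.List.pyRange i n 1).foldl
          (fun (st2 : Int × Int) j => (st2.1 + i * j, st2.2 + 1)) st) st
      = (st.1 + (l.map (fun i => i * (PySem.List.pyRange i n 1).sum)).sum,
         st.2 + (l.map (fun i => ((PySem.List.pyRange i n 1).length : Int))).sum) :=
  pv_pair_fold _ _ _ (fun st i => pv_inner_fold i (PySem.List.pyRange i n 1) st) l st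

theorem pv_gsum (m : Nat) : 2 * pvGsum (m : Int) = (m : Int) * m - m := by
  induction m with
  | zero => simp [pvGsum]
  | succ k ih =>
      unfold pvGsum at ih ⊢
      push_cast
      rw [PySem.List.pyRange_one_succ_right (by positivity : (0:Int) ≤ (k:Int)),
        List.sum_append]
      simp only [List.sum_cons, List.sum_nil]
      linear_combination ih

theorem pv_osum (m : Nat) : 2 * pvOsum (m : Int) = (m : Int) * m + m := by
  induction m with
  | zero => simp [pvOsum]
  | succ k ih =>
      unfold pvOsum at ih ⊢
      push_cast
      rw [PySem.List.pyRange_one_succ_right (by positivity : (0:Int) ≤ (k:Int)),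
        List.map_append, List.sum_append]
      have hcong : (PySem.List.pyRange 0 (k:Int) 1).map
            (fun i => ((PySem.List.pyRange i ((k:Int)+1) 1).length : Int))
          = (PySem.List.pyRange 0 (k:Int) 1).map
            (fun i => ((PySem.List.pyRange i (k:Int) 1).length : Int) + 1) := by
        apply List.map_congr_left
        intro i hi
        rw [PySem.List.mem_pyRange_one] at hi
        rw [PySem.List.pyRange_one_succ_right (le_of_lt hi.2)]
        simp
      rw [hcong, pv_sum_map_add _ _ (fun _ => 1), pv_sum_map_one]
      simp only [List.map_cons, List.map_nil, List.sum_cons, List.sum_nil]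
      rw [PySem.List.pyRange_one_singleton, PySem.List.length_pyRange_one]
      simp only [List.length_cons, List.length_nil, sub_zero, Int.toNat_natCast]
      push_cast
      linear_combination ih

theorem pv_rsum (m : Nat) :
    24 * pvRsum (m : Int)
      = 3 * ((m : Int) * m - m) ^ 2 + 2 * ((m : Int) - 1) * m * (2 * m - 1) := by
  induction m with
  | zero => simp [pvRsum]
  | succ k ih =>
      unfold pvRsum at ih ⊢
      push_cast
      rw [PySem.List.pyRange_one_succ_right (by positivity : (0:Int) ≤ (k:Int)),
        List.map_append, List.sum_append]
      have hcong : (PySem.List.pyRange 0 (k:Int) 1).map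
            (fun i => i * (PySem.List.pyRange i ((k:Int)+1) 1).sum)
          = (PySem.List.pyRange 0 (k:Int) 1).map
            (fun i => i * (PySem.List.pyRange i (k:Int) 1).sum + i * (k:Int)) := by
        apply List.map_congr_left
        intro i hi
        rw [PySem.List.mem_pyRange_one] at hi
        rw [PySem.List.pyRange_one_succ_right (le_of_lt hi.2), List.sum_append]
        simp
        ring
      rw [hcong, pv_sum_map_add _ _ (fun i => i * (k:Int)), pv_sum_map_mul_right]
      simp only [List.map_cons, List.map_nil, List.sum_cons, List.sum_nil]
      rw [PySem.List.pyRange_one_singleton]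
      simp only [List.sum_cons, List.sum_nil]
      have hg := pv_gsum k
      unfold pvGsum at hg
      linear_combination ih + 12 * (k:Int) * hg

theorem pv_dvd6 (m : Nat) : (6 : Int) ∣ (m : Int) * (m + 1) * (2 * m + 1) := by
  induction m with
  | zero => simp
  | succ k ih =>
      obtain ⟨c, hc⟩ := ih
      exact ⟨c + (k + 1) ^ 2, by push_cast at hc ⊢; linear_combination hc⟩

theorem pv_fd (a b c : Int) (hc : 0 < c) (h : a = c * b) :
    PySem.Int.floordiv a c = b := by
  rw [PySem.Int.floordiv_eq_ediv_of_pos hc, h, Int.mul_ediv_cancel_left _ (ne_of_gt hc)]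

-- ===== VERDICT (by name: the statement is the Claim_ definition above) =====
theorem mystery_function_1_spec : Claim_equal_mystery_function_1 := by
  intro n _
  unfold Spec_mystery_function_1
  have hA : mystery_function_1 n = [pvRsum n, pvOsum n] := by
    simp [mystery_function_1, pv_outer_fold, pvRsum, pvOsum]
  by_cases hn : n ≤ 0
  · rw [hA]
    simp [mystery_function_1_alt, hn, pvRsum, pvOsum, PySem.List.pyRange_one_eq_nil hn]
  · have hn : 0 < n := by omega
    have hmn : ((n.toNat : Nat) : Int) = n := Int.toNat_of_nonneg hn.le
    have h24 : 24 * pvRsum n = 3 * (n * n - n) ^ 2 + 2 * (n - 1) * n * (2 * n - 1) := by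
      rw [← hmn]; exact pv_rsum n.toNat
    have h2o : 2 * pvOsum n = n * n + n := by
      rw [← hmn]; exact pv_osum n.toNat
    obtain ⟨s, hs⟩ := Int.even_mul_succ_self (n - 1)
    obtain ⟨t, ht⟩ := Int.even_mul_succ_self n
    obtain ⟨q, hq⟩ := pv_dvd6 (n - 1).toNat
    rw [Int.toNat_of_nonneg (by omega : (0:Int) ≤ n - 1)] at hq
    have e1 : (n - 1) * ((n - 1) + 1) = 2 * s := by linear_combination hs
    have e2 : (n - 1) * ((n - 1) + 1) * (2 * (n - 1) + 1) = 6 * q := by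
      linear_combination hq
    have e3 : n * (n + 1) = 2 * t := by linear_combination ht
    have h12 : 12 * (s * s + q) = 12 * (2 * pvRsum n) := by
      linear_combination (-1) * h24 + (-3) * (n * n - n + 2 * s) * e1 + (-2) * e2
    have eR : s * s + q = 2 * pvRsum n := by linarith
    have eO : pvOsum n = t := by linarith [e3, h2o]
    rw [hA]
    simp only [mystery_function_1_alt, if_neg (by omega : ¬ n ≤ 0)]
    rw [pv_fd _ _ _ (by norm_num) e1, pv_fd _ _ _ (by norm_num) e2,
      pv_fd _ _ _ (by norm_num) eR, pv_fd _ _ _ (by norm_num) e3, eO]
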